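-- pv_equiv track=rewrite | github.com/HanSeongDeok/before-dinner-algorithm | programmers/han/Level 2-3/25.피로도.py | custom_combination
-- ===== SOURCE A (Python) =====
-- def custom_combination(k, dungeons):
--     result = []
--     def dfs(path, idx):
--         result.append(path[:])
--         for i in range(idx, len(dungeons)):
--             path.append(dungeons[i])
--             dfs(path, i + 1)
--             path.pop()
--     dfs([], 0)
--     return len(result)
-- ===== SOURCE B (Python) =====
-- def custom_combination(k, dungeons):
--     return 2 ** len(dungeons)
-- ===== Notes on version B (the rewrite author's own statement) =====
-- stated objective: faster
-- what changed: A enumerates every subset of dungeons by DFS backtracking and counts them; B returns the closed form 2**len(dungeons).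
import Mathlib
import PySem

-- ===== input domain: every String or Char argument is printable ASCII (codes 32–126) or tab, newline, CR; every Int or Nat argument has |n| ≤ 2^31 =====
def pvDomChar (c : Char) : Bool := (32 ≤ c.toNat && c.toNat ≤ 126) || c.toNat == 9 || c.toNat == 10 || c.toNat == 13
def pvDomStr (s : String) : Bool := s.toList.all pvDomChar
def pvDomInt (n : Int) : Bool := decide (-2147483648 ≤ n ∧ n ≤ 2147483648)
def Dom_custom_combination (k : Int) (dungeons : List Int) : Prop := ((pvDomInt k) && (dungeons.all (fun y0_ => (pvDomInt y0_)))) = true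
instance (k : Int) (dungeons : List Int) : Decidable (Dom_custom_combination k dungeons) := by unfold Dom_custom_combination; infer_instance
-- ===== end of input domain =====

-- B replaces A's exponential DFS enumeration of all subsets with the closed form 2^len(dungeons) (objective: faster).


-- ===== PORT A =====
-- A's dfs appends a copy of path, then for i in [idx, len) recurses with dungeons[i] appended.
-- Ported as a mutual pair: dfsA = the list of appended paths of one dfs call,
-- dfsLoopA = the paths appended by the for-loop starting at index i.
mutual
def dfsA (ds : List Int) (path : List Int) (idx : Nat) : List (List Int) :=
  path :: dfsLoopA ds path idx
termination_by 2 * (ds.length - idx) + 1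
decreasing_by all_goals omega
def dfsLoopA (ds : List Int) (path : List Int) (i : Nat) : List (List Int) :=
  if h : i < ds.length then
    dfsA ds (path ++ [ds[i]]) (i + 1) ++ dfsLoopA ds path (i + 1)
  else []
termination_by 2 * (ds.length - i)
decreasing_by all_goals omega
end

def custom_combination (k : Int) (dungeons : List Int) : Int :=
  ((dfsA dungeons [] 0).length : Int)

-- ===== PORT B =====
def custom_combination_alt (k : Int) (dungeons : List Int) : Int :=
  (2 : Int) ^ dungeons.length

-- ===== PRECONDITION & SPEC =====
def Spec_custom_combination (k : Int) (dungeons : List Int) (out : Int) : Prop := out = custom_combination_alt k dungeons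
instance (k : Int) (dungeons : List Int) (out : Int) : Decidable (Spec_custom_combination k dungeons out) := by unfold Spec_custom_combination; infer_instance

-- ===== CLAIM (what is proved, stated in full; the proofs are below) =====
def Claim_equal_custom_combination : Prop := ∀ (k : Int) (dungeons : List Int), Dom_custom_combination k dungeons → Spec_custom_combination k dungeons (custom_combination k dungeons)

-- ===== LEMMAS AND PROOFS =====

lemma dfsA_len (ds : List Int) :
    ∀ (fuel i : Nat) (path : List Int), ds.length ≤ i + fuel →
      (dfsA ds path i).length = 2 ^ (ds.length - i) ∧
      (dfsLoopA ds path i).length = 2 ^ (ds.length - i) - 1 := by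
  intro fuel
  induction fuel with
  | zero =>
    intro i path hle
    have hni : ¬ i < ds.length := by omega
    have h0 : ds.length - i = 0 := by omega
    rw [dfsA, dfsLoopA]
    simp [hni, h0]
  | succ n ih =>
    intro i path hle
    by_cases h : i < ds.length
    · have ihA := (ih (i + 1) (path ++ [ds[i]]) (by omega)).1
      have ihL := (ih (i + 1) path (by omega)).2
      rw [dfsA, dfsLoopA]
      simp [h, ihA, ihL]
      have hpow : 2 ^ (ds.length - i) = 2 * 2 ^ (ds.length - (i + 1)) := by
        rw [← pow_succ']
        congr 1
        omega
      have : 1 ≤ 2 ^ (ds.length - (i + 1)) := Nat.one_le_two_pow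
      omega
    · have h0 : ds.length - i = 0 := by omega
      rw [dfsA, dfsLoopA]
      simp [h, h0]

-- ===== VERDICT (by name: the statement is the Claim_ definition above) =====
theorem custom_combination_spec : Claim_equal_custom_combination := by
  intro k ds _
  unfold Spec_custom_combination custom_combination custom_combination_alt
  have h := (dfsA_len ds ds.length 0 [] (by omega)).1
  rw [h]
  push_cast
  norm_num
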